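-- pv_equiv track=rewrite | github.com/amberno1111/Data_Structure_and_Algorithm | LeetCode/Intersection_of_Two_Arrays_II.py | intersect
-- ===== SOURCE A (Python) =====
-- def intersect(nums1, nums2):
--     """
--     :type nums1: List[int]
--     :type nums2: List[int]
--     :rtype: List[int]
--     """
--     lookup, result = {}, []
--     for i in nums1:
--         if i in lookup.keys():
--             lookup[i] += 1
--         else:
--             lookup[i] = 1
--     for j in nums2:
--         if j in lookup.keys() and lookup[j] > 0:
--             result.append(j)
--             lookup[j] -= 1
--     return result
-- ===== SOURCE B (Python) =====
-- def intersect(nums1, nums2):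
--     return [j for k, j in enumerate(nums2)
--             if nums2[:k + 1].count(j) <= nums1.count(j)]
-- ===== Notes on version B (the rewrite author's own statement) =====
-- stated objective: simpler
-- what changed: Replaces A's stateful two-pass counter (build a count dict over nums1, then consume counts while scanning nums2) with a stateless one-line characterisation: keep the element at index k of nums2 iff its number of occurrences in nums2[:k+1] does not exceed its count in nums1.
import Mathlib
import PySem

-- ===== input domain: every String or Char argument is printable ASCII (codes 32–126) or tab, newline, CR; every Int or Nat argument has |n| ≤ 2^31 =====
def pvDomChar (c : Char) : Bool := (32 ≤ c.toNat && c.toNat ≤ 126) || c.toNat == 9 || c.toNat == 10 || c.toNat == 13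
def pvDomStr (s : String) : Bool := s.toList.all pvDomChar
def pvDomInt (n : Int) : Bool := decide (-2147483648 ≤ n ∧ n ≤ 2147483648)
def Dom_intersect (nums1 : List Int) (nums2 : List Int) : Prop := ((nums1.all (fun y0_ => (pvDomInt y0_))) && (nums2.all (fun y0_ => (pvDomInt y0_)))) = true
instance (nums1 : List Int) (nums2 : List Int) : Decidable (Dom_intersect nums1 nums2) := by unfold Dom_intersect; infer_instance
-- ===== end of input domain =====

-- B drops A's stateful counter entirely: keep nums2[k] iff its count in nums2[:k+1] ≤ its count in nums1.

-- ===== PORT A =====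
def intersect (nums1 : List Int) (nums2 : List Int) : List Int :=
  let lookup : PySem.Dict Int Int :=
    nums1.foldl (fun d i =>
      if d.contains i then d.insert i (d.getD i 0 + 1) else d.insert i 1)
      PySem.Dict.empty
  (nums2.foldl (fun (s : PySem.Dict Int Int × List Int) j =>
      if s.1.contains j && decide (s.1.getD j 0 > 0) then
        (s.1.insert j (s.1.getD j 0 - 1), s.2 ++ [j])
      else s)
    (lookup, [])).2

-- ===== PORT B =====
def intersect_alt (nums1 : List Int) (nums2 : List Int) : List Int :=
  ((PySem.List.enumerate nums2).filter
    (fun kj => decide (PySem.List.count (PySem.List.slice nums2 none (some (kj.1 + 1))) kj.2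
                        ≤ PySem.List.count nums1 kj.2))).map (·.2)

-- ===== PRECONDITION & SPEC =====
def Spec_intersect (nums1 : List Int) (nums2 : List Int) (out : List Int) : Prop := out = intersect_alt nums1 nums2
instance (nums1 : List Int) (nums2 : List Int) (out : List Int) : Decidable (Spec_intersect nums1 nums2 out) := by unfold Spec_intersect; infer_instance

-- ===== CLAIM (what is proved, stated in full; the proofs are below) =====
def Claim_equal_intersect : Prop := ∀ (nums1 : List Int) (nums2 : List Int), Dom_intersect nums1 nums2 → Spec_intersect nums1 nums2 (intersect nums1 nums2)

-- ===== LEMMAS AND PROOFS =====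

-- Common spec: keep j when fewer than c1 j of its occurrences have been kept so far;
-- s tracks how many occurrences of each value have been SEEN so far.
def goSpec (c1 : Int → Nat) : List Int → (Int → Nat) → List Int
  | [], _ => []
  | j :: js, s =>
      if s j + 1 ≤ c1 j then j :: goSpec c1 js (fun v => if v = j then s v + 1 else s v)
      else goSpec c1 js (fun v => if v = j then s v + 1 else s v)

-- A's counting loop builds exactly the multiplicity table of nums1.
theorem intersect_count_loop (l : List Int) (d : PySem.Dict Int Int) (v : Int) :
    (l.foldl (fun d i =>
      if d.contains i then d.insert i (d.getD i 0 + 1) else d.insert i 1) d).getD v 0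
      = d.getD v 0 + l.count v := by
  induction l generalizing d with
  | nil => simp
  | cons x xs ih =>
    simp only [List.foldl_cons, ih]
    by_cases hc : d.contains x = true
    · simp only [hc, if_true, PySem.Dict.getD_insert]
      rcases eq_or_ne v x with h | h
      · subst h; simp; ring
      · simp [h, Ne.symm h]
    · simp only [hc, if_false, Bool.false_eq_true, PySem.Dict.getD_insert]
      rcases eq_or_ne v x with h | h
      · subst h
        rw [PySem.Dict.getD_of_not_contains d 0 (by simpa using hc)]
        simp; ring
      · simp [h, Ne.symm h]

-- A's consuming loop equals goSpec whenever the dict holds the remaining allowances.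
theorem intersect_A_loop (c1 : Int → Nat) (l : List Int) (d : PySem.Dict Int Int)
    (res : List Int) (s : Int → Nat)
    (hinv : ∀ v, d.getD v 0 = ((c1 v - s v : Nat) : Int)) :
    (l.foldl (fun (st : PySem.Dict Int Int × List Int) j =>
      if st.1.contains j && decide (st.1.getD j 0 > 0) then
        (st.1.insert j (st.1.getD j 0 - 1), st.2 ++ [j])
      else st) (d, res)).2 = res ++ goSpec c1 l s := by
  induction l generalizing d res s with
  | nil => simp [goSpec]
  | cons j js ih =>
    simp only [List.foldl_cons, goSpec]
    by_cases hk : s j + 1 ≤ c1 j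
    · have hpos : d.getD j 0 > 0 := by rw [hinv j]; omega
      have hcont : d.contains j = true := by
        by_contra hc
        have := PySem.Dict.getD_of_not_contains d (k := j) 0 (by simpa using hc)
        omega
      rw [if_pos (by simp [hcont, hpos]), if_pos hk]
      have hinv' : ∀ v, (d.insert j (d.getD j 0 - 1)).getD v 0
          = ((c1 v - (if v = j then s v + 1 else s v) : Nat) : Int) := by
        intro v
        rcases eq_or_ne v j with h | h
        · subst h; simp [hinv v]; omega
        · simp [PySem.Dict.getD_insert, h, hinv v]
      rw [ih _ (res ++ [j]) _ hinv']
      simp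
    · have hz : d.getD j 0 = 0 := by rw [hinv j]; omega
      rw [if_neg (by simp [hz]), if_neg hk]
      refine ih _ _ _ (fun v => ?_)
      rcases eq_or_ne v j with h | h
      · subst h; rw [hinv v]; simp; omega
      · rw [hinv v]; simp [h]

-- B's filtered enumeration equals goSpec, where the seen-counter is the prefix count.
theorem intersect_B_loop (c1 : Int → Nat) (nums2 p l : List Int) (h : nums2 = p ++ l) :
    ((PySem.List.enumerate l (p.length : Int)).filter
      (fun kj => decide (PySem.List.count (PySem.List.slice nums2 none (some (kj.1 + 1))) kj.2
                          ≤ c1 kj.2))).map (·.2)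
    = goSpec c1 l (fun v => p.count v) := by
  induction l generalizing p with
  | nil => simp [PySem.List.enumerate, goSpec]
  | cons j js ih =>
    rw [PySem.List.enumerate_cons]
    have hslice : PySem.List.slice nums2 none (some ((p.length : Int) + 1)) = p ++ [j] := by
      rw [show ((p.length : Int) + 1) = ((p.length + 1 : Nat) : Int) by push_cast; ring,
          PySem.List.slice_to _ (by positivity)]
      simp [h, List.take_append]
    have hcnt : PySem.List.count (p ++ [j]) j = p.count j + 1 := by
      simp [PySem.List.count]
    simp only [List.filter_cons]
    by_cases hk : p.count j + 1 ≤ c1 j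
    · rw [if_pos (by simpa [hslice, hcnt] using hk)]
      simp only [List.map_cons, goSpec, if_pos hk]
      congr 1
      have hst : (fun v => if v = j then p.count v + 1 else p.count v)
          = (fun v => (p ++ [j]).count v) := by
        funext v
        rcases eq_or_ne v j with hv | hv
        · subst hv; simp
        · simp [hv, Ne.symm hv]
      rw [hst, ← ih (p ++ [j]) (by simp [h])]
      simp
    · rw [if_neg (by simpa [hslice, hcnt] using hk)]
      simp only [goSpec, if_neg hk]
      have hst : (fun v => if v = j then p.count v + 1 else p.count v)
          = (fun v => (p ++ [j]).count v) := by
        funext v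
        rcases eq_or_ne v j with hv | hv
        · subst hv; simp
        · simp [hv, Ne.symm hv]
      rw [hst, ← ih (p ++ [j]) (by simp [h])]
      simp

-- ===== VERDICT (by name: the statement is the Claim_ definition above) =====
theorem intersect_spec : Claim_equal_intersect := by
  intro nums1 nums2 _
  unfold Spec_intersect intersect intersect_alt
  rw [intersect_A_loop (fun v => PySem.List.count nums1 v) nums2 _ [] (fun _ => 0)
      (fun v => by rw [intersect_count_loop]; simp [PySem.List.count])]
  have hB := intersect_B_loop (fun v => PySem.List.count nums1 v) nums2 [] nums2 (by simp)
  simpa using hB.symm
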